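-- pv_equiv track=rewrite | github.com/abrinkk/psg-age-estimation | legacy/2020march/psg_reader.py | get_label_names
-- ===== SOURCE A (Python) =====
-- def get_label_names(labels, cohort):
--     if cohort == 'cfs':
--         labels = ['SEX' if x == 'sex' else x for x in labels]
--         labels = ['ESSSCOR' if x == 'ess' else x for x in labels]
--     elif cohort == 'shhs-v1':
--         labels = ['age_s1' if x == 'age' else x for x in labels]
--         labels = ['bmi_s1' if x == 'bmi' else x for x in labels]
--         labels = ['gender' if x == 'sex' else x for x in labels]
--         labels = ['ESS_s1' if x == 'ess' else x for x in labels]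
--     return labels
-- ===== SOURCE B (Python) =====
-- # Flat rule table (cohort, old_name, new_name); no per-cohort branching.
-- RULES = [
--     ('cfs', 'sex', 'SEX'),
--     ('cfs', 'ess', 'ESSSCOR'),
--     ('shhs-v1', 'age', 'age_s1'),
--     ('shhs-v1', 'bmi', 'bmi_s1'),
--     ('shhs-v1', 'sex', 'gender'),
--     ('shhs-v1', 'ess', 'ESS_s1'),
-- ]
--
--
-- def _rename(x, cohort):
--     for c, old, new in RULES:
--         if c == cohort and x == old:
--             return new
--     return x
--
--
-- def get_label_names(labels, cohort):
--     out = []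
--     for x in labels:
--         out.append(_rename(x, cohort))
--     return out
-- ===== Notes on version B (the rewrite author's own statement) =====
-- stated objective: alternative
-- what changed: Replaces A's cohort branch with several sequential full-list rewrite passes by a branch-free single pass with an accumulator, where each label is resolved by a first-match scan of one flat (cohort, old, new) rule table.
import Mathlib
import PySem

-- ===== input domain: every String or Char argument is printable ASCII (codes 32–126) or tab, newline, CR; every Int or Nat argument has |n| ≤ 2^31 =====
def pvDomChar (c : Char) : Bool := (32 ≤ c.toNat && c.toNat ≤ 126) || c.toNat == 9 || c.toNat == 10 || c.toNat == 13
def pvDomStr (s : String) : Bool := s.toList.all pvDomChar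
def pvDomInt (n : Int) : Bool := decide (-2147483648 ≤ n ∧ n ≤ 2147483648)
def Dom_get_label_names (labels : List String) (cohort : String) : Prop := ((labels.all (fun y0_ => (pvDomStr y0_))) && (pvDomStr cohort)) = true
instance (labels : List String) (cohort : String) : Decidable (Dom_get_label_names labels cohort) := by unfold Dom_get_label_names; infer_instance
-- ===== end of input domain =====

-- B: branch-free single accumulator pass; each label resolved by first-match scan of a flat (cohort, old, new) rule table (alternative decomposition).

-- ===== PORT A =====
def get_label_names (labels : List String) (cohort : String) : List String :=
  if cohort == "cfs" then
    let labels := labels.map (fun x => if x == "sex" then "SEX" else x)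
    let labels := labels.map (fun x => if x == "ess" then "ESSSCOR" else x)
    labels
  else if cohort == "shhs-v1" then
    let labels := labels.map (fun x => if x == "age" then "age_s1" else x)
    let labels := labels.map (fun x => if x == "bmi" then "bmi_s1" else x)
    let labels := labels.map (fun x => if x == "sex" then "gender" else x)
    let labels := labels.map (fun x => if x == "ess" then "ESS_s1" else x)
    labels
  else
    labels

-- ===== PORT B =====
def pvRules : List (String × String × String) :=
  [("cfs", "sex", "SEX"), ("cfs", "ess", "ESSSCOR"),
   ("shhs-v1", "age", "age_s1"), ("shhs-v1", "bmi", "bmi_s1"),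
   ("shhs-v1", "sex", "gender"), ("shhs-v1", "ess", "ESS_s1")]

-- _rename: first-match scan of the rule table (the Python for-loop with early return)
def pvRename (rules : List (String × String × String)) (x cohort : String) : String :=
  match rules with
  | [] => x
  | (c, old, new) :: rs => if c == cohort && x == old then new else pvRename rs x cohort

def get_label_names_alt (labels : List String) (cohort : String) : List String :=
  labels.foldl (fun out x => out ++ [pvRename pvRules x cohort]) []

-- ===== PRECONDITION & SPEC =====
def Spec_get_label_names (labels : List String) (cohort : String) (out : List String) : Prop := out = get_label_names_alt labels cohort
instance (labels : List String) (cohort : String) (out : List String) : Decidable (Spec_get_label_names labels cohort out) := by unfold Spec_get_label_names; infer_instance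

-- ===== CLAIM =====
def Claim_equal_get_label_names : Prop := ∀ (labels : List String) (cohort : String), Dom_get_label_names labels cohort → Spec_get_label_names labels cohort (get_label_names labels cohort)

-- ===== LEMMAS AND PROOFS =====
theorem alt_eq_map (labels : List String) (cohort : String) :
    get_label_names_alt labels cohort = labels.map (fun x => pvRename pvRules x cohort) := by
  unfold get_label_names_alt
  suffices h : ∀ (acc : List String),
      labels.foldl (fun out x => out ++ [pvRename pvRules x cohort]) acc
        = acc ++ labels.map (fun x => pvRename pvRules x cohort) by
    simpa using h []
  induction labels with
  | nil => intro acc; simp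
  | cons y ys ih => intro acc; simp [List.foldl, ih]

-- ===== VERDICT =====
theorem get_label_names_spec : Claim_equal_get_label_names := by
  intro labels cohort _
  unfold Spec_get_label_names get_label_names
  rw [alt_eq_map]
  by_cases h1 : cohort = "cfs"
  · subst h1
    simp only [beq_self_eq_true, if_pos, List.map_map]
    refine List.map_congr_left ?_
    intro a _
    by_cases ha : a = "sex"
    · subst ha; decide
    · by_cases hb : a = "ess"
      · subst hb; decide
      · simp [pvRename, pvRules, ha, hb]
  · by_cases h2 : cohort = "shhs-v1"
    · subst h2
      simp only [beq_self_eq_true, if_pos, List.map_map, beq_iff_eq,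
        reduceIte, String.reduceEq]
      refine List.map_congr_left ?_
      intro a _
      by_cases ha : a = "age"
      · subst ha; decide
      · by_cases hb : a = "bmi"
        · subst hb; decide
        · by_cases hc : a = "sex"
          · subst hc; decide
          · by_cases hd : a = "ess"
            · subst hd; decide
            · simp [pvRename, pvRules, ha, hb, hc, hd]
    · have e1 : (cohort == "cfs") = false := beq_eq_false_iff_ne.mpr h1
      have e2 : (cohort == "shhs-v1") = false := beq_eq_false_iff_ne.mpr h2
      have hr : ∀ a : String, pvRename pvRules a cohort = a := by
        intro a
        have g1 : (("cfs" : String) == cohort) = false := beq_eq_false_iff_ne.mpr (fun h => h1 h.symm)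
        have g2 : (("shhs-v1" : String) == cohort) = false := beq_eq_false_iff_ne.mpr (fun h => h2 h.symm)
        simp [pvRename, pvRules, g1, g2]
      simp [e1, e2, hr]
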